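-- pv_equiv track=rewrite | github.com/miliar/Code_Jam_Webscraper | solutions_python/solutions_year10_round0_nr3/832.py | get_fitting_groups
-- ===== SOURCE A (Python) =====
-- def get_fitting_groups(g, k):
--   sum = 0
--
--   for i in range(len(g)):
--     newsum = sum + g[i]
--     if newsum > k:
--       p1 = g[:i]
--       p2 = g[i:]
--       return sum, p2 + p1
--
--     sum = newsum
--
--   return sum, g
-- ===== SOURCE B (Python) =====
-- def get_fitting_groups(g, k):
--     # Stack-based splitting: walk a reversed copy as a stack, popping items
--     # that still fit into the remaining budget b onto 'taken'; the total is
--     # recovered as k - b and the rotated result is the two physical pieces.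
--     rev = g[::-1]
--     taken = []
--     b = k
--     while rev and rev[-1] <= b:
--         x = rev.pop()
--         b -= x
--         taken.append(x)
--     return k - b, rev[::-1] + taken
-- ===== Notes on version B (the rewrite author's own statement) =====
-- stated objective: alternative
-- what changed: Replaces the indexed for-loop accumulating a running sum and slicing at the found index by a stack-based physical split: a reversed copy is consumed as a stack while a remaining budget k is decremented (no running sum, no indices, no slicing at a computed index), the total being recovered as k minus the leftover budget and the rotation assembled from the two pieces.
import Mathlib
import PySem

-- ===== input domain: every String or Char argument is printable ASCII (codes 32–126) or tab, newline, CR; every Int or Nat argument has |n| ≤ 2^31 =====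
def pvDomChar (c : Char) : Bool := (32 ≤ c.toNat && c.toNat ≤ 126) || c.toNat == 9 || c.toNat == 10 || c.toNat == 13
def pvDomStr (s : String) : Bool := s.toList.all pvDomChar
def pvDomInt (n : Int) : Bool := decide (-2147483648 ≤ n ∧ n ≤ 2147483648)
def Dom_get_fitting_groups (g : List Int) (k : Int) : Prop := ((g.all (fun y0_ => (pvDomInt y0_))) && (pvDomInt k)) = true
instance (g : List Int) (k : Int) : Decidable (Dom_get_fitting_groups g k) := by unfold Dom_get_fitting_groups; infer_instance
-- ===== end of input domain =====

-- B replaces A's indexed running-sum loop (early return, slices at the found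
-- index) by a stack-based physical split of a reversed copy against a
-- decrementing budget (objective: alternative decomposition, same cost).


-- ===== PORT A =====
-- the 'for i in range(len(g))' loop with early return; g[:i]/g[i:] are exact as
-- take/drop since 0 ≤ i ≤ len(g)
def get_fitting_groups.go (g : List Int) (k : Int) (i : Nat) (sum : Int) : Int × List Int :=
  if h : i < g.length then
    let newsum := sum + g[i]
    if newsum > k then (sum, g.drop i ++ g.take i)
    else get_fitting_groups.go g k (i + 1) newsum
  else (sum, g)
termination_by g.length - i

def get_fitting_groups (g : List Int) (k : Int) : Int × List Int :=
  get_fitting_groups.go g k 0 0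

-- ===== PORT B =====
-- the 'while rev and rev[-1] <= b' loop of Source B: the stack 'rev' is a Lean list
-- popped at its END (getLast/dropLast), exactly Python's rev[-1]/rev.pop()
def pvLoop (rev taken : List Int) (b : Int) : List Int × List Int × Int :=
  if hrev : rev = [] then (rev, taken, b)
  else
    let x := rev.getLast hrev
    if x ≤ b then pvLoop rev.dropLast (taken ++ [x]) (b - x)
    else (rev, taken, b)
termination_by rev.length
decreasing_by
  have h0 : 0 < rev.length := List.length_pos_iff.mpr hrev
  simp only [List.length_dropLast]
  omega

def get_fitting_groups_alt (g : List Int) (k : Int) : Int × List Int :=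
  let res := pvLoop g.reverse [] k          -- rev = g[::-1]; taken = []; b = k; the while loop
  (k - res.2.2, res.1.reverse ++ res.2.1)   -- return k - b, rev[::-1] + taken

-- ===== PRECONDITION & SPEC =====
def Spec_get_fitting_groups (g : List Int) (k : Int) (out : Int × List Int) : Prop := out = get_fitting_groups_alt g k
instance (g : List Int) (k : Int) (out : Int × List Int) : Decidable (Spec_get_fitting_groups g k out) := by unfold Spec_get_fitting_groups; infer_instance

-- ===== CLAIM (what is proved, stated in full; the proofs are below) =====
def Claim_equal_get_fitting_groups : Prop := ∀ (g : List Int) (k : Int), Dom_get_fitting_groups g k → Spec_get_fitting_groups g k (get_fitting_groups g k)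

-- ===== LEMMAS AND PROOFS =====

-- proof-side description of A's loop outcome on the suffix: first relative index j
-- (with the sum t accumulated before it) where the running sum exceeds k
def pvScan (k : Int) : Int → List Int → Option (Nat × Int)
  | _, [] => none
  | s, x :: xs =>
    if s + x > k then some (0, s)
    else (pvScan k (s + x) xs).map (fun p => (p.1 + 1, p.2))

theorem goA_eq (g : List Int) (k : Int) :
    ∀ i s, i ≤ g.length →
    get_fitting_groups.go g k i s =
      match pvScan k s (g.drop i) with
      | some (j, t) => (t, g.drop (i + j) ++ g.take (i + j))
      | none => (s + (g.drop i).sum, g) := by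
  intro i s hi
  induction hn : g.length - i generalizing i s with
  | zero =>
    have hEq : i = g.length := by omega
    subst hEq
    rw [get_fitting_groups.go]
    simp [pvScan]
  | succ n ih =>
    have h : i < g.length := by omega
    rw [get_fitting_groups.go]
    have hdrop : g.drop i = g[i] :: g.drop (i + 1) := (List.getElem_cons_drop h).symm
    rw [hdrop]
    simp only [dif_pos h]
    by_cases hk : s + g[i] > k
    · simp [pvScan, hk]
    · rw [if_neg hk]
      rw [ih (i + 1) (s + g[i]) (by omega) (by omega)]
      simp only [pvScan, if_neg hk]
      cases hsc : pvScan k (s + g[i]) (g.drop (i + 1)) with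
      | none =>
        simp only [Option.map_none, List.sum_cons]
        rw [add_assoc]
      | some p =>
        cases p with
        | mk j t =>
          simp only [Option.map_some]
          have : i + 1 + j = i + (j + 1) := by omega
          simp [this]

-- proof-side forward description of B's loop: split xs at the first element
-- that no longer fits the budget b, returning (taken, rest, leftover budget)
def pvSplit (b : Int) : List Int → List Int × List Int × Int
  | [] => ([], [], b)
  | x :: xs =>
    if x ≤ b then
      let r := pvSplit (b - x) xs
      (x :: r.1, r.2.1, r.2.2)
    else ([], x :: xs, b)

theorem loop_split : ∀ (xs taken : List Int) (b : Int),
    pvLoop xs.reverse taken b =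
      ((pvSplit b xs).2.1.reverse, taken ++ (pvSplit b xs).1, (pvSplit b xs).2.2) := by
  intro xs
  induction xs with
  | nil => intro taken b; rw [pvLoop.eq_def]; simp [pvSplit]
  | cons x xs ih =>
    intro taken b
    have hne : (x :: xs).reverse ≠ [] := by simp
    rw [pvLoop.eq_def, dif_neg hne]
    have hconcat : (x :: xs).reverse = xs.reverse ++ [x] := by simp
    have hlast : (x :: xs).reverse.getLast hne = x := by
      simp [hconcat]
    have hdl : (x :: xs).reverse.dropLast = xs.reverse := by
      rw [hconcat, List.dropLast_concat]
    rw [hlast, hdl]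
    by_cases hx : x ≤ b
    · rw [if_pos hx, ih]
      simp [pvSplit, hx]
    · rw [if_neg hx]
      simp [pvSplit, hx]

theorem scan_split (k : Int) : ∀ (xs : List Int) (s : Int),
    (∀ j t, pvScan k s xs = some (j, t) →
        pvSplit (k - s) xs = (xs.take j, xs.drop j, k - t)) ∧
    (pvScan k s xs = none → pvSplit (k - s) xs = (xs, [], k - s - xs.sum)) := by
  intro xs
  induction xs with
  | nil =>
    intro s
    constructor
    · intro j t h; simp [pvScan] at h
    · intro _; simp [pvSplit]
  | cons x xs ih =>
    intro s
    constructor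
    · intro j t h
      simp only [pvScan] at h
      by_cases hk : s + x > k
      · rw [if_pos hk] at h
        simp at h
        obtain ⟨hj, ht⟩ := h
        subst hj ht
        have hx : ¬ x ≤ k - s := by omega
        simp [pvSplit, hx]
      · rw [if_neg hk] at h
        cases hsc : pvScan k (s + x) xs with
        | none => rw [hsc] at h; simp at h
        | some p =>
          cases p with
          | mk j' t' =>
            rw [hsc] at h
            simp only [Option.map_some, Option.some.injEq, Prod.mk.injEq] at h
            obtain ⟨hj, ht⟩ := h
            have hx : x ≤ k - s := by omega
            have hrec := (ih (s + x)).1 j' t' hsc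
            have hks : k - s - x = k - (s + x) := by ring
            rw [← hj, ← ht]
            simp [pvSplit, hx, hks, hrec]
    · intro h
      simp only [pvScan] at h
      by_cases hk : s + x > k
      · rw [if_pos hk] at h; simp at h
      · rw [if_neg hk] at h
        cases hsc : pvScan k (s + x) xs with
        | some p => rw [hsc] at h; simp at h
        | none =>
          have hx : x ≤ k - s := by omega
          have hrec := (ih (s + x)).2 hsc
          have : k - s - x = k - (s + x) := by ring
          simp only [pvSplit, if_pos hx, this, hrec, List.sum_cons, Prod.mk.injEq]
          refine ⟨trivial, trivial, by ring⟩

-- ===== VERDICT (by name: the statement is the Claim_ definition above) =====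
theorem get_fitting_groups_spec : Claim_equal_get_fitting_groups := by
  intro g k _
  unfold Spec_get_fitting_groups get_fitting_groups get_fitting_groups_alt
  rw [goA_eq g k 0 0 (Nat.zero_le _)]
  simp only [List.drop_zero]
  rw [loop_split g [] k]
  have hks : k - 0 = k := by ring
  cases hsc : pvScan k 0 g with
  | none =>
    have hsplit := (scan_split k g 0).2 hsc
    rw [hks] at hsplit
    simp [hsplit]
  | some p =>
    cases p with
    | mk j t =>
      have hsplit := (scan_split k g 0).1 j t hsc
      rw [hks] at hsplit
      simp [hsplit]
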